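-- pv_equiv track=rewrite | github.com/jordansatler/SNP-finder | SNPfinder.py | find_snps
-- ===== SOURCE A (Python) =====
-- def find_snps(mat):
--     """locate snps in locus"""
--     s = {n[0]:[] for n in mat}
--     z_mat = [f[1] for f in mat]
--
--     # find snps with allowed base pairs
--     allowed = ['A', 'C', 'G', 'T']
--     for index, i in enumerate(zip(*z_mat)):
--         if len(set(i).intersection(allowed)) > 1:
--             # found a snp
--             for j in range(len(mat)):
--                 s[mat[j][0]].append(z_mat[j][index])
--     return s
-- ===== SOURCE B (Python) =====
-- def find_snps(mat):
--     """locate snps in locus"""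
--     if not mat:
--         return {}
--     width = min(len(seq) for _, seq in mat)
--     # row-major scan: OR a per-base bit into one bitmask per column
--     bit = {'A': 1, 'C': 2, 'G': 4, 'T': 8}
--     masks = [0] * width
--     for _, seq in mat:
--         masks = [m | bit.get(seq[i], 0) for i, m in enumerate(masks)]
--     # a column is a SNP iff its mask has >= 2 bits set
--     snp = [i for i, m in enumerate(masks) if m & (m - 1)]
--     return {name: [seq[i] for i in snp] for name, seq in mat}
-- ===== Notes on version B (the rewrite author's own statement) =====
-- stated objective: alternative
-- what changed: A transposes the alignment with zip(*) and tests each column by building a set and intersecting it with the allowed bases, appending columns into a pre-built dict of lists; B never transposes: it scans row-major, OR-ing a 4-bit base mask per column into a mask array, detects SNP columns with the m & (m-1) two-bits-set trick, and then builds the result per sequence by index extraction.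
-- outside the precondition, e.g. on find_snps([('x', 'AC'), ('x', 'GG')]): A returns {'x': ['A', 'G', 'C', 'G']}, B returns {'x': ['G', 'G']}
import Mathlib
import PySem

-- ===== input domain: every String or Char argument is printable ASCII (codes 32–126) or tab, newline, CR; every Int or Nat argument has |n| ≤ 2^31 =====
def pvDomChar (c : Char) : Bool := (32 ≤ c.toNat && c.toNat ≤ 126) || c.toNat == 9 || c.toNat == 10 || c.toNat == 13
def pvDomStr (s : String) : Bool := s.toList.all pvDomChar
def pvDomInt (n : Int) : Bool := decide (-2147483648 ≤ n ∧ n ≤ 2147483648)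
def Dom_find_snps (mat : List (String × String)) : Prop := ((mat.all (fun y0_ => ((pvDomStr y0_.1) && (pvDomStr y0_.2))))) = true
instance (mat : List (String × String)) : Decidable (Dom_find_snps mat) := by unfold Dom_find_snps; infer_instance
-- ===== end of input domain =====

-- B replaces A's transpose-and-set-intersect column test (zip(*), set intersection, dict of
-- appended lists) by a row-major scan that ORs a 4-bit base code into one bitmask per column,
-- detects SNP columns with the m & (m-1) bit trick, and extracts them per sequence (alternative).

-- ===== PORT A =====
-- pvCols zmat = zip(*z_mat): the list of columns, truncated at the shortest sequence; zip() of no iterables is empty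
def pvCols (zmat : List (List Char)) : List (List Char) :=
  match zmat with
  | [] => []
  | s :: rest =>
    (List.range ((rest.map List.length).foldl Nat.min s.length)).map
      (fun i => (s :: rest).map (fun t => t.getD i ' '))

-- pvSnpTest col = len(set(col).intersection(['A','C','G','T'])) > 1  (A's SNP test)
def pvSnpTest (col : List Char) : Bool :=
  1 < ((PySem.Set.ofList col).filter (fun c => ['A','C','G','T'].contains c)).length

def find_snps (mat : List (String × String)) : List (String × List String) :=
  let s0 : PySem.Dict String (List String) :=
    mat.foldl (fun d n => d.insert n.1 ([] : List String)) PySem.Dict.empty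
  let zmat : List (List Char) := mat.map (fun f => f.2.toList)
  let final := (PySem.List.enumerate (pvCols zmat)).foldl (fun s p =>
    if pvSnpTest p.2 then
      (List.range mat.length).foldl (fun s j =>
        s.modify (mat.getD j ("", "")).1 []
          (fun v => v ++ [String.ofList [((PySem.List.pyGet? (zmat.getD j []) p.1).getD ' ')]])) s
    else s) s0
  final.items

-- ===== PORT B =====
-- pvBit c = bit.get(c, 0), the literal dict {'A':1,'C':2,'G':4,'T':8} of Source B
def pvBit (c : Char) : Nat :=
  if c = 'A' then 1 else if c = 'C' then 2 else if c = 'G' then 4 else if c = 'T' then 8 else 0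

-- masks hold nonnegative small ints, so they are Nat here; for m = 0 Python's m & (m - 1)
-- is 0 & -1 = 0 and Nat's truncated m - 1 gives 0 &&& 0 = 0: the same (falsy) value.
def find_snps_alt (mat : List (String × String)) : List (String × List String) :=
  match mat with
  | [] => []
  | f :: rest =>
    let width : Nat := (rest.map (fun p => p.2.toList.length)).foldl Nat.min f.2.toList.length
    let masks : List Nat :=
      (f :: rest).foldl (fun ms p =>
        (PySem.List.enumerate ms).map
          (fun q => q.2 ||| pvBit ((PySem.List.pyGet? p.2.toList q.1).getD ' ')))
        (List.replicate width 0)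
    let snp : List Int :=
      ((PySem.List.enumerate masks).filter (fun q => (q.2 &&& (q.2 - 1)) != 0)).map (fun q => q.1)
    ((f :: rest).foldl (fun d p =>
        d.insert p.1 (snp.map (fun i => String.ofList [((PySem.List.pyGet? p.2.toList i).getD ' ')])))
      PySem.Dict.empty).items

-- ===== PRECONDITION & SPEC =====
-- Pre_ excludes matrices with duplicate sequence names, on which A's single dict entry per name
-- accidentally interleaves the bases of all same-named sequences (a defensible duplicate-key corner).
def Pre_find_snps (mat : List (String × String)) : Prop := (mat.map (fun p => p.1)).Nodup
instance (mat : List (String × String)) : Decidable (Pre_find_snps mat) := by unfold Pre_find_snps; infer_instance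
def pvWitness_find_snps : (List (String × String)) := [("x", "ACGT"), ("y", "AGGA")]

def Spec_find_snps (mat : List (String × String)) (out : List (String × List String)) : Prop := out = find_snps_alt mat
instance (mat : List (String × String)) (out : List (String × List String)) : Decidable (Spec_find_snps mat out) := by unfold Spec_find_snps; infer_instance

-- ===== CLAIM (what is proved, stated in full; the proofs are below) =====
def Claim_equal_find_snps : Prop := ∀ (mat : List (String × String)), Dom_find_snps mat → Pre_find_snps mat → Spec_find_snps mat (find_snps mat)

-- ===== LEMMAS AND PROOFS =====

-- common reference form both ports are reduced to: the SNP column indices, then per-name extraction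
def pvSnpIdxs (mat : List (String × String)) : List Int :=
  ((PySem.List.enumerate (pvCols (mat.map (fun f => f.2.toList)))).filter (fun p => pvSnpTest p.2)).map (fun p => p.1)

def pvAltRef (mat : List (String × String)) : List (String × List String) :=
  mat.map (fun p =>
    (p.1, (pvSnpIdxs mat).map (fun i => String.ofList [((PySem.List.pyGet? p.2.toList i).getD ' ')])))

-- the step A performs per SNP column, rephrased as a fold over name/base pairs
def pvStep (names : List String) (d : PySem.Dict String (List String)) (col : List Char) : PySem.Dict String (List String) :=
  if pvSnpTest col then
    (names.zip (col.map (fun c => String.ofList [c]))).foldl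
      (fun s q => s.modify q.1 [] (fun v => v ++ [q.2])) d
  else d

lemma pvFoldlMin_le_init (l : List Nat) (a : Nat) : l.foldl Nat.min a ≤ a := by
  induction l generalizing a with
  | nil => simp
  | cons x l ih =>
    simp only [List.foldl_cons]
    exact le_trans (ih (Nat.min a x)) (Nat.min_le_left a x)

lemma pvFoldlMin_le_mem (l : List Nat) (a x : Nat) (hx : x ∈ l) : l.foldl Nat.min a ≤ x := by
  induction l generalizing a with
  | nil => simp at hx
  | cons y l ih =>
    simp only [List.foldl_cons]
    rcases List.mem_cons.mp hx with h | h
    · subst h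
      exact le_trans (pvFoldlMin_le_init l (Nat.min a x)) (Nat.min_le_right a x)
    · exact ih (Nat.min a y) h

lemma pvCols_length (zmat : List (List Char)) (col : List Char) (h : col ∈ pvCols zmat) :
    col.length = zmat.length := by
  match zmat with
  | [] => simp [pvCols] at h
  | s :: rest =>
    simp only [pvCols, List.mem_map, List.mem_range] at h
    obtain ⟨i, _, rfl⟩ := h
    simp

lemma pvCols_getD (zmat : List (List Char)) (i : Nat) (hi : i < (pvCols zmat).length) :
    (pvCols zmat).getD i [] = zmat.map (fun t => t.getD i ' ') ∧
      ∀ j, j < zmat.length → i < (zmat.getD j []).length := by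
  match zmat with
  | [] => simp [pvCols] at hi
  | s :: rest =>
    simp only [pvCols, List.length_map, List.length_range] at hi
    constructor
    · rw [List.getD_eq_getElem _ _ (by simpa [pvCols] using hi)]
      simp [pvCols]
    · intro j hj
      cases j with
      | zero =>
        simpa using lt_of_lt_of_le hi (pvFoldlMin_le_init _ _)
      | succ j =>
        have hj' : j < rest.length := by simpa using hj
        have hmem : (rest.getD j []).length ∈ rest.map List.length := by
          rw [List.getD_eq_getElem _ _ hj']
          exact List.mem_map.mpr ⟨rest[j], List.getElem_mem _, rfl⟩
        simpa using lt_of_lt_of_le hi (pvFoldlMin_le_mem _ _ _ hmem)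

lemma pvSet_update_of_subset (xs s : List String) (h : ∀ x ∈ xs, x ∈ s) :
    PySem.Set.update s xs = s := by
  induction xs generalizing s with
  | nil => rfl
  | cons x xs ih =>
    have hxmem : x ∈ s := h x (by simp)
    have hx : PySem.Set.add s x = s := by
      simp [PySem.Set.add, hxmem]
    simp only [PySem.Set.update, List.foldl_cons] at *
    rw [hx]
    exact ih s (fun y hy => h y (List.mem_cons_of_mem _ hy))

lemma pvSet_update_append (xs s : List String) (h : (s ++ xs).Nodup) :
    PySem.Set.update s xs = s ++ xs := by
  induction xs generalizing s with
  | nil => simp [PySem.Set.update]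
  | cons x xs ih =>
    have hxs : x ∉ s := by
      intro hmem
      rcases List.nodup_append.mp h with ⟨_, _, hdisj⟩
      exact hdisj x hmem x (by simp) rfl
    have hx : PySem.Set.add s x = s ++ [x] := by
      simp [PySem.Set.add, hxs]
    simp only [PySem.Set.update, List.foldl_cons] at *
    rw [hx, ih (s ++ [x]) (by simpa using h)]
    simp

-- convenience form of PySem.List.mem_enumerate_iff with the components split out and getD
lemma pvMem_enumerate (l : List (List Char)) (k : Int) (p : Int × List Char)
    (hp : p ∈ PySem.List.enumerate l k) :
    ∃ i : Nat, i < l.length ∧ p.1 = k + i ∧ p.2 = l.getD i [] := by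
  obtain ⟨i, hi, rfl⟩ := (PySem.List.mem_enumerate_iff l k p).mp hp
  exact ⟨i, hi, rfl, by rw [List.getD_eq_getElem _ _ hi]⟩

lemma pvEnumFilterMap (g : List Char → String) (h : Int → String) :
    ∀ (cols : List (List Char)) (k : Nat),
      (∀ i, i < cols.length → h ((k + i : Nat) : Int) = g (cols.getD i [])) →
      ((PySem.List.enumerate cols (k : Int)).filter (fun p => pvSnpTest p.2)).map (fun p => h p.1)
        = (cols.filter pvSnpTest).map g := by
  intro cols
  induction cols with
  | nil => intro k H; rfl
  | cons c cs ih =>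
    intro k H
    have h0 : h (k : Int) = g c := by simpa using H 0 (by simp)
    have hrec := ih (k + 1) (fun i hi => by
      have hlt : i + 1 < (c :: cs).length := by simpa using Nat.succ_lt_succ hi
      have := H (i + 1) hlt
      have e : ((k + (i + 1) : Nat) : Int) = ((k + 1 + i : Nat) : Int) := by push_cast; ring
      rw [e] at this
      simpa using this)
    have e1 : PySem.List.enumerate (c :: cs) (k : Int)
        = ((k : Int), c) :: PySem.List.enumerate cs ((k : Int) + 1) := rfl
    have e2 : ((k : Int) + 1) = ((k + 1 : Nat) : Int) := by push_cast; ring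
    rw [e1, e2]
    by_cases hc : pvSnpTest c
    · simp only [List.filter_cons, hc, if_true, List.map_cons, h0, hrec]
    · simp only [List.filter_cons, hc]
      simpa [hc] using hrec

lemma pvFoldl_range_zip {β : Type} (f : β → String → String → β) :
    ∀ (names chars : List String) (b : β), names.length = chars.length →
      (List.range names.length).foldl (fun s j => f s (names.getD j "") (chars.getD j "")) b
        = (names.zip chars).foldl (fun s q => f s q.1 q.2) b := by
  intro names
  induction names with
  | nil => intro chars b h; simp
  | cons n ns ih =>
    intro chars b h
    cases chars with
    | nil => simp at h
    | cons c cs =>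
      have e : List.range (n :: ns).length = 0 :: (List.range ns.length).map (· + 1) := by
        simp [List.range_succ_eq_map]
      rw [e, List.zip_cons_cons]
      simp only [List.foldl_cons, List.foldl_map, List.getD_cons_zero, List.getD_cons_succ]
      exact ih cs (f b n c) (by simpa using h)

lemma pvZipFilter :
    ∀ (names chars : List String), names.Nodup → names.length = chars.length →
      ∀ j, j < names.length →
      ((names.zip chars).filter (fun q => q.1 == names.getD j "")).map (fun q => q.2)
        = [chars.getD j ""] := by
  intro names
  induction names with
  | nil => intro chars _ _ j hj; simp at hj
  | cons n ns ih =>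
    intro chars hnd hl j hj
    cases chars with
    | nil => simp at hl
    | cons c cs =>
      rw [List.zip_cons_cons]
      cases j with
      | zero =>
        simp only [List.getD_cons_zero, List.filter_cons]
        have hn : (n == n) = true := by simp
        have htail : (ns.zip cs).filter (fun q => q.1 == n) = [] := by
          apply List.filter_eq_nil_iff.mpr
          intro q hq
          obtain ⟨a, b⟩ := q
          have h1 : a ∈ ns := (List.of_mem_zip hq).1
          have : a ≠ n := by
            intro e; exact (List.nodup_cons.mp hnd).1 (e ▸ h1)
          simpa using this
        simp [htail]
      | succ j =>
        simp only [List.getD_cons_succ, List.filter_cons]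
        have hj' : j < ns.length := by simpa using hj
        have hkey : ns.getD j "" ∈ ns := by
          rw [List.getD_eq_getElem _ _ hj']; exact List.getElem_mem _
        have hne : (n == ns.getD j "") = false := by
          have : n ≠ ns.getD j "" := fun e => (List.nodup_cons.mp hnd).1 (e ▸ hkey)
          simpa using this
        simp only [hne, Bool.false_eq_true, if_false]
        exact ih cs (List.nodup_cons.mp hnd).2 (by simpa using hl) j hj'

lemma pvGetD_insert_fold :
    ∀ (mat : List (String × String)) (d : PySem.Dict String (List String)) (c : String),
      (mat.foldl (fun d n => d.insert n.1 ([] : List String)) d).getD c []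
        = if c ∈ mat.map (fun p => p.1) then [] else d.getD c [] := by
  intro mat
  induction mat with
  | nil => intro d c; simp
  | cons m rest ih =>
    intro d c
    simp only [List.foldl_cons, List.map_cons]
    rw [ih, PySem.Dict.getD_insert]
    by_cases h1 : c ∈ rest.map (fun p => p.1) <;> by_cases h2 : c = m.1 <;> simp [h1, h2]

lemma pvStep_keys (names : List String) (d : PySem.Dict String (List String)) (col : List Char)
    (hk : d.keys = names) (hc : col.length = names.length) :
    (pvStep names d col).keys = names := by
  unfold pvStep
  by_cases hs : pvSnpTest col
  · simp only [hs, if_true]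
    rw [PySem.Dict.keys_foldl_modify_key, hk]
    have hmap : (names.zip (col.map (fun c => String.ofList [c]))).map (fun q => q.1) = names := by
      have := List.map_fst_zip (l₁ := names) (l₂ := col.map (fun c => String.ofList [c]))
        (by simp [hc])
      simpa using this
    rw [hmap]
    exact pvSet_update_of_subset names names (fun x h => h)
  · simp [hs, hk]

lemma pvOuter_getD :
    ∀ (cols : List (List Char)) (names : List String) (d : PySem.Dict String (List String)),
      d.keys = names → names.Nodup → (∀ col ∈ cols, col.length = names.length) →
      ∀ j, j < names.length →
      (cols.foldl (pvStep names) d).getD (names.getD j "") []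
        = d.getD (names.getD j "") []
            ++ (cols.filter pvSnpTest).map (fun col => String.ofList [col.getD j ' ']) := by
  intro cols
  induction cols with
  | nil => intro names d hk hn hc j hj; simp
  | cons col cols ih =>
    intro names d hk hn hc j hj
    have hcol : col.length = names.length := hc col (by simp)
    have hjc : j < col.length := by omega
    have hk' : (pvStep names d col).keys = names := pvStep_keys names d col hk hcol
    simp only [List.foldl_cons, List.filter_cons]
    rw [ih names (pvStep names d col) hk' hn (fun c hcm => hc c (by simp [hcm])) j hj]
    by_cases hs : pvSnpTest col
    · have hstep : (pvStep names d col).getD (names.getD j "") []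
          = d.getD (names.getD j "") [] ++ [String.ofList [col.getD j ' ']] := by
        unfold pvStep
        simp only [hs, if_true]
        rw [PySem.Dict.getD_foldl_modify_append]
        congr 1
        rw [pvZipFilter names (col.map (fun c => String.ofList [c])) hn (by simp [hcol]) j hj]
        congr 1
        rw [List.getD_eq_getElem _ _ (by simpa using hjc), List.getElem_map,
          List.getD_eq_getElem _ _ hjc]
      rw [hstep]
      simp [hs, List.append_assoc]
    · have hstep : pvStep names d col = d := by unfold pvStep; simp [hs]
      rw [hstep]
      simp [hs]

lemma pvOuter_keys :
    ∀ (cols : List (List Char)) (names : List String) (d : PySem.Dict String (List String)),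
      d.keys = names → (∀ col ∈ cols, col.length = names.length) →
      (cols.foldl (pvStep names) d).keys = names := by
  intro cols
  induction cols with
  | nil => intro names d hk _; simpa using hk
  | cons col cols ih =>
    intro names d hk hc
    simp only [List.foldl_cons]
    exact ih names _ (pvStep_keys names d col hk (hc col (by simp)))
      (fun c hcm => hc c (by simp [hcm]))

lemma pvGetD_map_chars (col : List Char) (j : Nat) (hj : j < col.length) :
    (col.map (fun c => String.ofList [c])).getD j "" = String.ofList [col.getD j ' '] := by
  rw [List.getD_eq_getElem _ _ (by simpa using hj), List.getElem_map,
    List.getD_eq_getElem _ _ hj]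

lemma pvColVal (zmat : List (List Char)) (i j : Nat) (hj : j < zmat.length) :
    (zmat.map (fun t => t.getD i ' ')).getD j ' ' = (zmat.getD j []).getD i ' ' := by
  rw [List.getD_eq_getElem _ _ (by simpa using hj), List.getElem_map,
    List.getD_eq_getElem _ _ hj]

lemma find_snps_eq (mat : List (String × String)) :
    find_snps mat =
      ((PySem.List.enumerate (pvCols (mat.map (fun f => f.2.toList)))).foldl (fun s p =>
        if pvSnpTest p.2 then
          (List.range mat.length).foldl (fun s j =>
            s.modify (mat.getD j ("", "")).1 []
              (fun v => v ++ [String.ofList [((PySem.List.pyGet? ((mat.map (fun f => f.2.toList)).getD j []) p.1).getD ' ')]])) s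
        else s)
        (mat.foldl (fun d n => d.insert n.1 ([] : List String)) PySem.Dict.empty)).items := rfl

-- A reduced to the reference form (old interleaved loop = index extraction)
lemma pv_A_eq_ref (mat : List (String × String)) (hpre : Pre_find_snps mat) :
    find_snps mat = pvAltRef mat := by
  have hpre' : (mat.map (fun p => p.1)).Nodup := hpre
  rw [find_snps_eq]
  show _ = mat.map (fun p =>
    (p.1, (pvSnpIdxs mat).map (fun i => String.ofList [((PySem.List.pyGet? p.2.toList i).getD ' ')])))
  have hnlen : (mat.map (fun p => p.1)).length = mat.length := by simp
  have hcollen : ∀ col ∈ pvCols (mat.map (fun f => f.2.toList)),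
      col.length = (mat.map (fun p => p.1)).length := by
    intro col h
    rw [pvCols_length _ col h]; simp
  have hs0keys : (mat.foldl (fun d n => d.insert n.1 ([] : List String)) PySem.Dict.empty).keys
      = mat.map (fun p => p.1) := by
    rw [PySem.Dict.keys_foldl_insert_key]
    have he : (PySem.Dict.empty : PySem.Dict String (List String)).keys = [] := rfl
    rw [he]
    have := pvSet_update_append (mat.map (fun p => p.1)) [] (by simpa using hpre')
    simpa using this
  have hconv :
      (PySem.List.enumerate (pvCols (mat.map (fun f => f.2.toList)))).foldl (fun s p =>
        if pvSnpTest p.2 then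
          (List.range mat.length).foldl (fun s j =>
            s.modify (mat.getD j ("", "")).1 []
              (fun v => v ++ [String.ofList [((PySem.List.pyGet? ((mat.map (fun f => f.2.toList)).getD j []) p.1).getD ' ')]])) s
        else s)
        (mat.foldl (fun d n => d.insert n.1 ([] : List String)) PySem.Dict.empty)
      = (pvCols (mat.map (fun f => f.2.toList))).foldl (pvStep (mat.map (fun p => p.1)))
          (mat.foldl (fun d n => d.insert n.1 ([] : List String)) PySem.Dict.empty) := by
    rw [PySem.List.foldl_congr_mem _ _
      (fun s (p : Int × List Char) => pvStep (mat.map (fun q => q.1)) s p.2) _ ?_]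
    · have hm : ((PySem.List.enumerate (pvCols (mat.map (fun f => f.2.toList))) 0).map
            (fun p : Int × List Char => p.2)).foldl
            (pvStep (mat.map (fun q => q.1)))
            (mat.foldl (fun d n => d.insert n.1 ([] : List String)) PySem.Dict.empty)
          = (PySem.List.enumerate (pvCols (mat.map (fun f => f.2.toList))) 0).foldl
            (fun s p => pvStep (mat.map (fun q => q.1)) s p.2)
            (mat.foldl (fun d n => d.insert n.1 ([] : List String)) PySem.Dict.empty) :=
        List.foldl_map
      rw [PySem.List.map_snd_enumerate] at hm
      exact hm.symm
    · intro acc p hp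
      obtain ⟨i, hi, hp1, hp2⟩ := pvMem_enumerate _ 0 p hp
      have hp1' : p.1 = (i : Int) := by rw [hp1]; ring
      obtain ⟨hcget, hlen⟩ := pvCols_getD (mat.map (fun f => f.2.toList)) i hi
      by_cases hs : pvSnpTest p.2
      · have hplen : p.2.length = mat.length := by rw [hp2, hcget]; simp
        have hcong : ∀ (acc2 : PySem.Dict String (List String)), ∀ j ∈ List.range mat.length,
            acc2.modify (mat.getD j ("", "")).1 []
              (fun v => v ++ [String.ofList [((PySem.List.pyGet? ((mat.map (fun f => f.2.toList)).getD j []) p.1).getD ' ')]])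
            = acc2.modify ((mat.map (fun q => q.1)).getD j "") []
              (fun v => v ++ [(p.2.map (fun c => String.ofList [c])).getD j ""]) := by
          intro acc2 j hj
          have hjm : j < mat.length := by simpa using hj
          have hjz : j < (mat.map (fun f => f.2.toList)).length := by simpa using hjm
          have hkey : (mat.getD j ("", "")).1 = (mat.map (fun q => q.1)).getD j "" := by
            rw [List.getD_eq_getElem _ _ hjm, List.getD_eq_getElem _ _ (by simpa using hjm)]
            simp
          have hival : i < ((mat.map (fun f => f.2.toList)).getD j []).length := hlen j hjz
          have hval : ((PySem.List.pyGet? ((mat.map (fun f => f.2.toList)).getD j []) p.1).getD ' ')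
              = ((mat.map (fun f => f.2.toList)).getD j []).getD i ' ' := by
            rw [hp1', PySem.List.pyGet?_natCast, List.getElem?_eq_getElem hival,
              List.getD_eq_getElem _ _ hival]
            rfl
          have hjp : j < p.2.length := by omega
          have hchars : (p.2.map (fun c => String.ofList [c])).getD j ""
              = String.ofList [((mat.map (fun f => f.2.toList)).getD j []).getD i ' '] := by
            rw [pvGetD_map_chars p.2 j hjp]
            congr 1
            have : p.2.getD j ' ' = ((mat.map (fun f => f.2.toList)).map (fun t => t.getD i ' ')).getD j ' ' := by
              rw [hp2, hcget]
            rw [this, pvColVal _ i j hjz]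
          rw [hkey, hval, hchars]
        have h1 := PySem.List.foldl_congr_mem (List.range mat.length) _ _ acc hcong
        have h2 := pvFoldl_range_zip (fun s a b => s.modify a [] (fun v => v ++ [b]))
          (mat.map (fun q => q.1)) (p.2.map (fun c => String.ofList [c])) acc (by simp [hplen])
        rw [hnlen] at h2
        simp only [hs, if_true]
        rw [h1]
        rw [h2]
        simp [pvStep, hs]
      · simp [pvStep, hs]
  rw [hconv]
  have hfkeys := pvOuter_keys (pvCols (mat.map (fun f => f.2.toList))) (mat.map (fun p => p.1)) _
    hs0keys hcollen
  rw [PySem.Dict.items_eq_map_keys _ (by rw [hfkeys]; exact hpre') ([] : List String), hfkeys]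
  apply List.ext_getElem
  · simp
  intro j h1 h2
  have hjm : j < mat.length := by simpa using h2
  have hjn : j < (mat.map (fun p => p.1)).length := by simpa using hjm
  have hjz : j < (mat.map (fun f => f.2.toList)).length := by simpa using hjm
  simp only [List.getElem_map]
  refine congrArg (Prod.mk _) ?_
  have hkd : (mat[j]'hjm).1 = (mat.map (fun p => p.1)).getD j "" := by
    rw [List.getD_eq_getElem _ _ hjn]; simp
  rw [hkd]
  rw [pvOuter_getD (pvCols (mat.map (fun f => f.2.toList))) (mat.map (fun p => p.1)) _
    hs0keys hpre' hcollen j hjn]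
  rw [pvGetD_insert_fold]
  have hmem : (mat.map (fun p => p.1)).getD j "" ∈ mat.map (fun p => p.1) := by
    rw [List.getD_eq_getElem _ _ hjn]; exact List.getElem_mem _
  rw [if_pos hmem, List.nil_append]
  show _ = ((((PySem.List.enumerate (pvCols (mat.map (fun f => f.2.toList)))).filter
      (fun p => pvSnpTest p.2)).map (fun p => p.1)).map
      (fun i => String.ofList [((PySem.List.pyGet? (mat[j]'hjm).2.toList i).getD ' ')]))
  rw [List.map_map]
  have hEF := pvEnumFilterMap (fun col => String.ofList [col.getD j ' '])
      (fun idx => String.ofList [((PySem.List.pyGet? ((mat[j]'hjm).2.toList) idx).getD ' ')])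
      (pvCols (mat.map (fun f => f.2.toList))) 0 (by
    intro i hi
    obtain ⟨hcget, hlen⟩ := pvCols_getD (mat.map (fun f => f.2.toList)) i hi
    have hseq : (mat[j]'hjm).2.toList = (mat.map (fun f => f.2.toList)).getD j [] := by
      rw [List.getD_eq_getElem _ _ hjz]; simp
    have hival : i < ((mat.map (fun f => f.2.toList)).getD j []).length := hlen j hjz
    have e0 : ((0 + i : Nat) : Int) = ((i : Nat) : Int) := by push_cast; ring
    show String.ofList [((PySem.List.pyGet? ((mat[j]'hjm).2.toList) ((0 + i : Nat) : Int)).getD ' ')]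
        = String.ofList [((pvCols (mat.map (fun f => f.2.toList))).getD i []).getD j ' ']
    rw [e0, hseq, PySem.List.pyGet?_natCast, List.getElem?_eq_getElem hival, hcget,
      pvColVal _ i j hjz]
    rw [List.getD_eq_getElem _ _ hival]
    rfl)
  rw [Nat.cast_zero] at hEF
  simpa [Function.comp] using hEF.symm

-- ===== B-side: the bitmask scan computes the same SNP index list =====

-- the per-column encoding the row-major OR-scan ends at: one bit per allowed base present
def pvEnc (col : List Char) : Nat :=
  (if 'A' ∈ col then 1 else 0) ||| (if 'C' ∈ col then 2 else 0) |||
    (if 'G' ∈ col then 4 else 0) ||| (if 'T' ∈ col then 8 else 0)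

lemma pvBit_enc (c : Char) (cs : List Char) : pvBit c ||| pvEnc cs = pvEnc (c :: cs) := by
  unfold pvEnc pvBit
  have s1 : ('A' ∈ c :: cs) = (c = 'A' ∨ 'A' ∈ cs) := by simp [List.mem_cons, eq_comm]
  have s2 : ('C' ∈ c :: cs) = (c = 'C' ∨ 'C' ∈ cs) := by simp [List.mem_cons, eq_comm]
  have s3 : ('G' ∈ c :: cs) = (c = 'G' ∨ 'G' ∈ cs) := by simp [List.mem_cons, eq_comm]
  have s4 : ('T' ∈ c :: cs) = (c = 'T' ∨ 'T' ∈ cs) := by simp [List.mem_cons, eq_comm]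
  simp only [s1, s2, s3, s4]
  by_cases e1 : c = 'A' <;> by_cases e2 : c = 'C' <;> by_cases e3 : c = 'G' <;>
    by_cases e4 : c = 'T' <;>
    by_cases h1 : 'A' ∈ cs <;> by_cases h2 : 'C' ∈ cs <;> by_cases h3 : 'G' ∈ cs <;>
    by_cases h4 : 'T' ∈ cs <;>
    simp_all

lemma pvFold_or_enc (col : List Char) :
    ∀ m : Nat, col.foldl (fun m c => m ||| pvBit c) m = m ||| pvEnc col := by
  induction col with
  | nil => intro m; simp [pvEnc]
  | cons c cs ih =>
    intro m
    simp only [List.foldl_cons]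
    rw [ih (m ||| pvBit c), Nat.lor_assoc, pvBit_enc]

lemma pvFilter_len_nodup :
    ∀ s : List Char, s.Nodup →
      (s.filter (fun c => ['A','C','G','T'].contains c)).length
        = (if 'A' ∈ s then 1 else 0) + (if 'C' ∈ s then 1 else 0)
            + (if 'G' ∈ s then 1 else 0) + (if 'T' ∈ s then 1 else 0) := by
  intro s
  induction s with
  | nil => intro _; simp
  | cons x xs ih =>
    intro hnd
    have hx : x ∉ xs := (List.nodup_cons.mp hnd).1
    have ihx := ih (List.nodup_cons.mp hnd).2
    have s1 : ('A' ∈ x :: xs) = (x = 'A' ∨ 'A' ∈ xs) := by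
      simp [List.mem_cons, eq_comm]
    have s2 : ('C' ∈ x :: xs) = (x = 'C' ∨ 'C' ∈ xs) := by
      simp [List.mem_cons, eq_comm]
    have s3 : ('G' ∈ x :: xs) = (x = 'G' ∨ 'G' ∈ xs) := by
      simp [List.mem_cons, eq_comm]
    have s4 : ('T' ∈ x :: xs) = (x = 'T' ∨ 'T' ∈ xs) := by
      simp [List.mem_cons, eq_comm]
    simp only [s1, s2, s3, s4]
    by_cases e1 : x = 'A' <;> by_cases e2 : x = 'C' <;> by_cases e3 : x = 'G' <;>
      by_cases e4 : x = 'T' <;>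
      simp_all <;> omega

-- the two SNP tests agree: >=2 bits in the mask iff >=2 distinct allowed bases in the column
lemma pvMask_snp (col : List Char) :
    ((pvEnc col &&& (pvEnc col - 1)) != 0) = pvSnpTest col := by
  unfold pvSnpTest
  rw [pvFilter_len_nodup (PySem.Set.ofList col) (PySem.Set.nodup_ofList col)]
  have mA : ('A' ∈ PySem.Set.ofList col) ↔ 'A' ∈ col := PySem.Set.mem_ofList _ _
  have mC : ('C' ∈ PySem.Set.ofList col) ↔ 'C' ∈ col := PySem.Set.mem_ofList _ _
  have mG : ('G' ∈ PySem.Set.ofList col) ↔ 'G' ∈ col := PySem.Set.mem_ofList _ _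
  have mT : ('T' ∈ PySem.Set.ofList col) ↔ 'T' ∈ col := PySem.Set.mem_ofList _ _
  unfold pvEnc
  by_cases h1 : 'A' ∈ col <;> by_cases h2 : 'C' ∈ col <;> by_cases h3 : 'G' ∈ col <;>
    by_cases h4 : 'T' ∈ col <;>
    simp [h1, h2, h3, h4, mA, mC, mG, mT]

-- B's mask-update step preserves the length of masks
lemma pvMaskStep_length (ms : List Nat) (p : String × String) :
    ((PySem.List.enumerate ms).map
      (fun q => q.2 ||| pvBit ((PySem.List.pyGet? p.2.toList q.1).getD ' '))).length
      = ms.length := by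
  rw [List.length_map, PySem.List.length_enumerate]

lemma pvMasks_length (rows : List (String × String)) :
    ∀ ms : List Nat,
      (rows.foldl (fun ms p => (PySem.List.enumerate ms).map
        (fun q => q.2 ||| pvBit ((PySem.List.pyGet? p.2.toList q.1).getD ' '))) ms).length
        = ms.length := by
  induction rows with
  | nil => intro ms; rfl
  | cons r rs ih =>
    intro ms
    simp only [List.foldl_cons]
    rw [ih, pvMaskStep_length]

-- one mask position through B's whole fold = a row-wise OR of the base bits of column i
lemma pvMasks_getD (rows : List (String × String)) (i : Nat) :
    ∀ ms : List Nat, i < ms.length → (∀ p ∈ rows, ms.length ≤ p.2.toList.length) →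
      (rows.foldl (fun ms p => (PySem.List.enumerate ms).map
        (fun q => q.2 ||| pvBit ((PySem.List.pyGet? p.2.toList q.1).getD ' '))) ms).getD i 0
        = rows.foldl (fun m p => m ||| pvBit (p.2.toList.getD i ' ')) (ms.getD i 0) := by
  induction rows with
  | nil => intro ms _ _; rfl
  | cons r rs ih =>
    intro ms hi hlen
    simp only [List.foldl_cons]
    have hstep : ((PySem.List.enumerate ms).map
        (fun q => q.2 ||| pvBit ((PySem.List.pyGet? r.2.toList q.1).getD ' '))).getD i 0
        = ms.getD i 0 ||| pvBit (r.2.toList.getD i ' ') := by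
      have hi' : i < ((PySem.List.enumerate ms).map
          (fun q => q.2 ||| pvBit ((PySem.List.pyGet? r.2.toList q.1).getD ' '))).length := by
        rw [pvMaskStep_length]; exact hi
      have hie : i < (PySem.List.enumerate ms 0).length := by
        rw [PySem.List.length_enumerate]; exact hi
      have hir : i < r.2.toList.length := lt_of_lt_of_le hi (hlen r (by simp))
      rw [List.getD_eq_getElem _ _ hi', List.getElem_map,
        PySem.List.getElem_enumerate ms 0 i hie]
      have e0 : ((0 : Int) + (i : Nat)) = ((i : Nat) : Int) := by ring
      rw [e0]
      simp only
      rw [PySem.List.pyGet?_natCast, List.getElem?_eq_getElem hir]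
      rw [List.getD_eq_getElem _ _ hi, List.getD_eq_getElem _ _ hir]
      rfl
    have := ih ((PySem.List.enumerate ms).map
        (fun q => q.2 ||| pvBit ((PySem.List.pyGet? r.2.toList q.1).getD ' ')))
      (by rw [pvMaskStep_length]; exact hi)
      (by intro p hp; rw [pvMaskStep_length]; exact hlen p (by simp [hp]))
    rw [this, hstep]

-- filter+map-fst over two enumerations of equal length with pointwise-equal tests agree
lemma pvEnumFilterFst {α β : Type} (p : α → Bool) (q : β → Bool) :
    ∀ (xs : List α) (ys : List β) (k : Int), xs.length = ys.length →
      (∀ i : Nat, i < xs.length → ∀ (h1 : i < xs.length) (h2 : i < ys.length),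
        p (xs[i]) = q (ys[i])) →
      ((PySem.List.enumerate xs k).filter (fun r => p r.2)).map (fun r => r.1)
        = ((PySem.List.enumerate ys k).filter (fun r => q r.2)).map (fun r => r.1) := by
  intro xs
  induction xs with
  | nil =>
    intro ys k hlen _
    have : ys = [] := List.eq_nil_of_length_eq_zero (by simpa using hlen.symm)
    subst this; rfl
  | cons x xs ih =>
    intro ys k hlen hpt
    cases ys with
    | nil => simp at hlen
    | cons y ys =>
      have e1 : PySem.List.enumerate (x :: xs) k = (k, x) :: PySem.List.enumerate xs (k + 1) := rfl
      have e2 : PySem.List.enumerate (y :: ys) k = (k, y) :: PySem.List.enumerate ys (k + 1) := rfl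
      have h0 : p x = q y := by
        have := hpt 0 (by simp) (by simp) (by simp)
        simpa using this
      have hrec := ih ys (k + 1) (by simpa using hlen) (by
        intro i hi h1 h2
        have := hpt (i + 1) (by simpa using Nat.succ_lt_succ hi)
          (by simpa using Nat.succ_lt_succ hi) (by simpa using Nat.succ_lt_succ h2)
        simpa using this)
      rw [e1, e2]
      simp only [List.filter_cons]
      by_cases hpx : p x
      · rw [if_pos (by simpa using hpx), if_pos (by rw [← h0]; simpa using hpx)]
        simp only [List.map_cons]
        rw [hrec]
      · rw [if_neg (by simpa using hpx), if_neg (by rw [← h0]; simpa using hpx)]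
        exact hrec

-- B reduced to the reference form
lemma pv_B_eq_ref (mat : List (String × String)) (hpre : Pre_find_snps mat) :
    find_snps_alt mat = pvAltRef mat := by
  cases mat with
  | nil => rfl
  | cons f rest =>
    simp only [find_snps_alt, pvAltRef]
    have hzmat : (f :: rest).map (fun g => g.2.toList) = f.2.toList :: rest.map (fun g => g.2.toList) := rfl
    -- the width of B equals the truncation width of zip(*)
    have hwidth : (rest.map (fun p => p.2.toList.length)).foldl Nat.min f.2.toList.length
        = ((rest.map (fun g => g.2.toList)).map List.length).foldl Nat.min f.2.toList.length := by
      rw [List.map_map]; rfl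
    set width := (rest.map (fun p => p.2.toList.length)).foldl Nat.min f.2.toList.length with hw
    have hcols : pvCols ((f :: rest).map (fun g => g.2.toList))
        = (List.range width).map
            (fun i => ((f :: rest).map (fun g => g.2.toList)).map (fun t => t.getD i ' ')) := by
      rw [hzmat]
      show (List.range (((rest.map (fun g => g.2.toList)).map List.length).foldl Nat.min f.2.toList.length)).map _ = _
      rw [← hwidth]
    have hcolslen : (pvCols ((f :: rest).map (fun g => g.2.toList))).length = width := by
      rw [hcols]; simp
    -- every sequence is at least `width` long
    have hrowlen : ∀ p ∈ (f :: rest), width ≤ p.2.toList.length := by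
      intro p hp
      rcases List.mem_cons.mp hp with h | h
      · subst h; exact pvFoldlMin_le_init _ _
      · exact pvFoldlMin_le_mem _ _ _ (List.mem_map.mpr ⟨p, h, rfl⟩)
    -- it suffices that the two index lists coincide
    have hsnp :
        ((PySem.List.enumerate ((f :: rest).foldl (fun ms p => (PySem.List.enumerate ms).map
            (fun q => q.2 ||| pvBit ((PySem.List.pyGet? p.2.toList q.1).getD ' ')))
            (List.replicate width 0))).filter (fun q => (q.2 &&& (q.2 - 1)) != 0)).map (fun q => q.1)
        = pvSnpIdxs (f :: rest) := by
      unfold pvSnpIdxs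
      refine pvEnumFilterFst (fun m => (m &&& (m - 1)) != 0) pvSnpTest _ _ 0 ?_ ?_
      · rw [pvMasks_length, List.length_replicate, hcolslen]
      · intro i hi h1 h2
        rw [pvMasks_length, List.length_replicate] at hi
        -- the i-th mask
        have hmask := pvMasks_getD (f :: rest) i (List.replicate width 0)
          (by rw [List.length_replicate]; exact hi)
          (by intro p hp; rw [List.length_replicate]; exact hrowlen p hp)
        rw [List.getD_eq_getElem _ _ h1] at hmask
        have hrepl : (List.replicate width (0 : Nat)).getD i 0 = 0 := by
          rw [List.getD_eq_getElem _ _ (by simpa using hi)]; simp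
        rw [hrepl] at hmask
        -- the i-th column
        have hcoli : (pvCols ((f :: rest).map (fun g => g.2.toList)))[i]
            = ((f :: rest).map (fun g => g.2.toList)).map (fun t => t.getD i ' ') := by
          have := (pvCols_getD ((f :: rest).map (fun g => g.2.toList)) i (by rw [hcolslen]; exact hi)).1
          rw [List.getD_eq_getElem _ _ h2] at this
          exact this
        -- the row-wise OR is the column mask
        have hfold : (f :: rest).foldl (fun m p => m ||| pvBit (p.2.toList.getD i ' ')) 0
            = pvEnc ((((f :: rest).map (fun g => g.2.toList)).map (fun t => t.getD i ' '))) := by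
          have e1 : (f :: rest).foldl (fun m p => m ||| pvBit (p.2.toList.getD i ' ')) 0
              = (((f :: rest).map (fun g => g.2.toList)).map (fun t => t.getD i ' ')).foldl
                  (fun m c => m ||| pvBit c) 0 := by
            rw [List.foldl_map, List.foldl_map]
          rw [e1, pvFold_or_enc]
          simp
        rw [hmask, hfold, hcoli]
        exact pvMask_snp _
    rw [hsnp]
    rw [PySem.Dict.items_foldl_insert_fresh (f :: rest) (fun p => p.1)
      (fun p => (pvSnpIdxs (f :: rest)).map
        (fun i => String.ofList [((PySem.List.pyGet? p.2.toList i).getD ' ')]))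
      PySem.Dict.empty (fun a _ => PySem.Dict.contains_empty a.1) hpre]
    rfl

-- ===== VERDICT (by name: the statement is the Claim_ definition above) =====
theorem find_snps_spec : Claim_equal_find_snps := by
  intro mat _ hpre
  show find_snps mat = find_snps_alt mat
  rw [pv_A_eq_ref mat hpre, pv_B_eq_ref mat hpre]
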